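-- pv_equiv track=rewrite | github.com/laurent-croq/advent-of-code | 2020/11.py | new_seat_state2
-- ===== SOURCE A (Python) =====
-- def new_seat_state2(seats, occupied, x, y):
--     seen = 0
--     for dx,dy in [ [dx,dy] for dx in range(-1,2) for dy in range(-1,2) if [dx,dy] != [0,0] ]:
--         check_x = x+dx
--         check_y = y+dy
--         while check_x in range(len(seats)) and check_y in range(len(seats[0])) and not seats[check_x][check_y]:
--             check_x += dx
--             check_y += dy
--
--         if check_x in range(len(seats)) and check_y in range(len(seats[0])) and occupied[check_x][check_y]:
--             seen += 1
--             if not occupied[x][y] or seen == 5: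
--                 return(False)
--     return(True)
-- ===== SOURCE B (Python) =====
-- DIRS = ((-1, -1), (-1, 0), (-1, 1), (0, -1), (0, 1), (1, -1), (1, 0), (1, 1))
--
-- def new_seat_state2(seats, occupied, x, y):
--     rows, cols = len(seats), len(seats[0])
--     if not (0 <= x < rows and 0 <= y < cols):
--         return True  # position outside the grid: nothing is visible
--     def extent(d, c, limit):
--         # how many cells remain on this axis when stepping by d from c
--         if d == 0:
--             return rows + cols  # unbounded on this axis
--         return limit - 1 - c if d == 1 else c
--     count = 0
--     for dx, dy in DIRS:
--         steps = min(extent(dx, x, rows), extent(dy, y, cols))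
--         ray = [(x + k * dx, y + k * dy) for k in range(1, steps + 1)]
--         occ = [occupied[i][j] for (i, j) in ray if seats[i][j]]
--         count += 1 if occ and occ[0] else 0
--     return count == 0 if not occupied[x][y] else count < 5
-- ===== Notes on version B (the rewrite author's own statement) =====
-- stated objective: alternative
-- what changed: A walks each of the 8 rays with a bounds-checked coordinate-stepping while loop and returns False mid-scan; B computes each ray's length in closed form from the position and grid limits, materialises the ray as a list, extracts the first seat by a filtered comprehension, counts all visible occupied neighbours, and applies the rule once at the end.
-- outside the precondition, e.g. on new_seat_state2([[True], [True]], [[True], [False]], -1, 0): A returns False, B returns True; on new_seat_state2([[True]], [[True], [False]], 1, 0): A returns False, B returns True; on new_seat_state2([[True, True, True]], [[False, False]], 0, 0): A returns True, B raises IndexError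
import Mathlib
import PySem

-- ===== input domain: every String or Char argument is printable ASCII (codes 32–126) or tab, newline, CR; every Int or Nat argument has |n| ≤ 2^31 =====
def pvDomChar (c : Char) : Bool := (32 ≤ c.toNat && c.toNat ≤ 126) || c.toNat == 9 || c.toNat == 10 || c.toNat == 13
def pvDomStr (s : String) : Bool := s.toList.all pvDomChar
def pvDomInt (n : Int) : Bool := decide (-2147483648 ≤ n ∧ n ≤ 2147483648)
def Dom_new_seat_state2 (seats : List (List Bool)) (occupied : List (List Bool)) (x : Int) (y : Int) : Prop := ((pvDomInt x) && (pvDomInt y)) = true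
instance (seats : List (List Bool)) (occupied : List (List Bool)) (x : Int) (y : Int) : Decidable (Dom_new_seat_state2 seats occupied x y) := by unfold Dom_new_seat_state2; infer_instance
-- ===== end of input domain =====

-- B replaces A's coordinate-stepping while-loops (bounds-checked at every step, with early
-- returns) by closed-form ray extents, materialised ray lists filtered for their first seat,
-- a full count, and one application of the rule (alternative decomposition; same cost).

-- g[i][j]; none (IndexError) never occurs inside Pre_, default false
def pvAt (g : List (List Bool)) (i j : Int) : Bool :=
  (((PySem.List.pyGet? g i).bind (fun r => PySem.List.pyGet? r j)).getD false)

-- 'check_x in range(rows) and check_y in range(cols)'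
def pvInR (rows cols cx cy : Int) : Bool :=
  decide (0 ≤ cx) && decide (cx < rows) && decide (0 ≤ cy) && decide (cy < cols)

-- the 8 directions, in Python's iteration order
def pvDirs : List (Int × Int) := [(-1,-1),(-1,0),(-1,1),(0,-1),(0,1),(1,-1),(1,0),(1,1)]

-- ===== PORT A =====
-- A's while loop: step by (dx,dy) while in range and not a seat; fuel rows+cols+2 always
-- suffices since (dx,dy) ≠ (0,0) moves one coordinate monotonically each step
def pvScan (seats : List (List Bool)) (rows cols dx dy : Int) : Nat → Int → Int → Int × Int
  | 0, cx, cy => (cx, cy)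
  | f + 1, cx, cy =>
    if pvInR rows cols cx cy && !(pvAt seats cx cy) then
      pvScan seats rows cols dx dy f (cx + dx) (cy + dy)
    else (cx, cy)

-- scan outward from (x+dx, y+dy); true iff the first seat hit is in range and occupied
def pvVisible (seats occupied : List (List Bool)) (rows cols x y dx dy : Int) : Bool :=
  let p := pvScan seats rows cols dx dy (rows.toNat + cols.toNat + 2) (x + dx) (y + dy)
  pvInR rows cols p.1 p.2 && pvAt occupied p.1 p.2

-- A's direction loop: running tally 'seen' with early return False
def pvGoA (seats occupied : List (List Bool)) (rows cols x y : Int) :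
    List (Int × Int) → Int → Bool
  | [], _ => true
  | (dx, dy) :: rest, seen =>
    if pvVisible seats occupied rows cols x y dx dy then
      if !(pvAt occupied x y) || (seen + 1 == 5) then false
      else pvGoA seats occupied rows cols x y rest (seen + 1)
    else pvGoA seats occupied rows cols x y rest seen

def new_seat_state2 (seats : List (List Bool)) (occupied : List (List Bool)) (x : Int) (y : Int) : Bool :=
  let rows : Int := seats.length
  let cols : Int := ((PySem.List.pyGetD seats 0 []).length : Int)  -- len(seats[0]); A only reaches it when seats ≠ []
  pvGoA seats occupied rows cols x y pvDirs 0

-- ===== PORT B =====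
-- B's extent(d, c, limit): closed-form number of cells left on one axis when stepping by d
def pvExt (rows cols d c limit : Int) : Int :=
  if d == 0 then rows + cols else if d == 1 then limit - 1 - c else c

-- one direction: build the ray by its closed-form length, keep the seat cells' occupancy,
-- B's 'occ and occ[0]' (B's direct seats[i][j]/occupied[i][j] is in range inside Pre_; default false)
def pvRayOcc (seats occupied : List (List Bool)) (rows cols x y dx dy : Int) : Bool :=
  let steps := min (pvExt rows cols dx x rows) (pvExt rows cols dy y cols)
  let ray := (PySem.List.pyRange 1 (steps + 1) 1).map (fun k => (x + k * dx, y + k * dy))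
  let occ := (ray.filter (fun p => pvAt seats p.1 p.2)).map (fun p => pvAt occupied p.1 p.2)
  occ.headD false

def new_seat_state2_alt (seats : List (List Bool)) (occupied : List (List Bool)) (x : Int) (y : Int) : Bool :=
  let rows : Int := seats.length
  let cols : Int := ((PySem.List.pyGetD seats 0 []).length : Int)  -- len(seats[0])
  if decide (0 ≤ x) && decide (x < rows) && decide (0 ≤ y) && decide (y < cols) then
    let count : Int := pvDirs.foldl
      (fun c d => c + (if pvRayOcc seats occupied rows cols x y d.1 d.2 then 1 else 0)) 0
    if !(pvAt occupied x y) then (count == 0) else decide (count < 5)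
  else true  -- position outside the grid: nothing is visible

-- ===== PRECONDITION & SPEC =====
-- Pre_ excludes seats = [] (A returns True where B's len(seats[0]) raises), ragged or
-- under-sized grids (either program can raise an IndexError there), and positions outside
-- the grid but adjacent to it — an unspecified corner where A's value is an artefact of
-- mixing Python's wrapping occupied[x][y] with non-wrapping range checks and B naturally
-- reports no visible neighbour; positions far outside the grid are admitted.
def Pre_new_seat_state2 (seats : List (List Bool)) (occupied : List (List Bool)) (x : Int) (y : Int) : Prop :=
  seats ≠ [] ∧
  ((x < -1 ∨ (seats.length : Int) < x ∨ y < -1 ∨ ((seats.headI).length : Int) < y) ∨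
   ((∀ row ∈ seats, (seats.headI).length ≤ row.length) ∧
    seats.length ≤ occupied.length ∧
    (∀ row ∈ occupied.take seats.length, (seats.headI).length ≤ row.length) ∧
    0 ≤ x ∧ x < (seats.length : Int) ∧ 0 ≤ y ∧ y < ((seats.headI).length : Int)))
instance (seats : List (List Bool)) (occupied : List (List Bool)) (x : Int) (y : Int) : Decidable (Pre_new_seat_state2 seats occupied x y) := by unfold Pre_new_seat_state2; infer_instance

def pvWitness_new_seat_state2 : List (List Bool) × List (List Bool) × Int × Int :=
  ([[true, true], [true, true]], [[true, false], [false, true]], 0, 1)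

def Spec_new_seat_state2 (seats : List (List Bool)) (occupied : List (List Bool)) (x : Int) (y : Int) (out : Bool) : Prop := out = new_seat_state2_alt seats occupied x y
instance (seats : List (List Bool)) (occupied : List (List Bool)) (x : Int) (y : Int) (out : Bool) : Decidable (Spec_new_seat_state2 seats occupied x y out) := by unfold Spec_new_seat_state2; infer_instance

-- ===== CLAIM (what is proved, stated in full; the proofs are below) =====
def Claim_equal_new_seat_state2 : Prop := ∀ (seats : List (List Bool)) (occupied : List (List Bool)) (x : Int) (y : Int), Dom_new_seat_state2 seats occupied x y → Pre_new_seat_state2 seats occupied x y → Spec_new_seat_state2 seats occupied x y (new_seat_state2 seats occupied x y)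

-- ===== LEMMAS AND PROOFS =====

theorem pv_dirs_bounds (dx dy : Int) (h : (dx, dy) ∈ pvDirs) :
    (-1 ≤ dx ∧ dx ≤ 1 ∧ -1 ≤ dy ∧ dy ≤ 1) := by
  fin_cases h <;> norm_num

-- the scan stops at once when the start is out of range
theorem pv_scan_stop (seats : List (List Bool)) (rows cols dx dy : Int) (fuel : Nat)
    (cx cy : Int) (h : pvInR rows cols cx cy = false) :
    pvScan seats rows cols dx dy fuel cx cy = (cx, cy) := by
  cases fuel <;> simp [pvScan, h]

-- A's loop returns True when no direction is visible
theorem pv_goA_all_false (seats occupied : List (List Bool)) (rows cols x y : Int)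
    (dirs : List (Int × Int)) (seen : Int)
    (h : ∀ d ∈ dirs, pvVisible seats occupied rows cols x y d.1 d.2 = false) :
    pvGoA seats occupied rows cols x y dirs seen = true := by
  induction dirs generalizing seen with
  | nil => simp [pvGoA]
  | cons d rest ih =>
    obtain ⟨dx, dy⟩ := d
    have hd := h (dx, dy) (by simp)
    simp only [pvGoA, hd, Bool.false_eq_true, if_false]
    exact ih seen (fun d hd' => h d (by simp [hd']))

-- B's foldl counts the directions whose ray sees an occupied seat
theorem pv_foldl_count (v : Int × Int → Bool) (dirs : List (Int × Int)) (s : Int) :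
    dirs.foldl (fun c d => c + (if v d then 1 else 0)) s = s + (dirs.countP v : Int) := by
  induction dirs generalizing s with
  | nil => simp
  | cons d rest ih =>
    simp only [List.foldl_cons, List.countP_cons, ih]
    by_cases h : v d = true <;> simp [h] <;> ring

-- A's early-return loop, characterised by the count of visible directions
theorem pv_goA_eq (seats occupied : List (List Bool)) (rows cols x y : Int)
    (dirs : List (Int × Int)) (seen : Int) :
    (pvAt occupied x y = false →
      pvGoA seats occupied rows cols x y dirs seen
        = decide ((dirs.countP (fun d => pvVisible seats occupied rows cols x y d.1 d.2)) = 0)) ∧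
    (pvAt occupied x y = true → seen < 5 →
      pvGoA seats occupied rows cols x y dirs seen
        = decide (seen + (dirs.countP (fun d => pvVisible seats occupied rows cols x y d.1 d.2) : Int) < 5)) := by
  induction dirs generalizing seen with
  | nil => constructor <;> intro h <;> simp [pvGoA]
  | cons d rest ih =>
    obtain ⟨dx, dy⟩ := d
    constructor
    · intro hocc
      by_cases hv : pvVisible seats occupied rows cols x y dx dy = true
      · simp [pvGoA, hv, hocc]
      · simp [pvGoA, hv, (ih seen).1 hocc]
    · intro hocc hlt
      by_cases hv : pvVisible seats occupied rows cols x y dx dy = true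
      · by_cases h5 : seen + 1 = 5
        · have hc : (0 : Int) ≤ (rest.countP (fun d => pvVisible seats occupied rows cols x y d.1 d.2) : Int) := by positivity
          simp [pvGoA, hv, hocc, h5]
          omega
        · have := (ih (seen + 1)).2 hocc (by omega)
          simp only [pvGoA, hv, hocc, List.countP_cons, if_true]
          have h5' : (seen + 1 == (5 : Int)) = false := by simp [h5]
          simp [h5', this]
          constructor <;> intro h <;> push_cast at * <;> omega
      · have := (ih seen).2 hocc hlt
        simp [pvGoA, hv, this]

-- THE KEY LEMMA: the while-scan's verdict = first-seat-on-the-materialised-ray, provided the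
-- ray's n cells are exactly the in-range prefix of the walk (cell n is the first out of range)
theorem pv_ray (seats occupied : List (List Bool)) (rows cols dx dy : Int) (n : Nat) :
    ∀ (fuel : Nat) (cx cy : Int), n ≤ fuel →
    (∀ k : Nat, k < n → pvInR rows cols (cx + k * dx) (cy + k * dy) = true) →
    pvInR rows cols (cx + n * dx) (cy + n * dy) = false →
    (pvInR rows cols (pvScan seats rows cols dx dy fuel cx cy).1 (pvScan seats rows cols dx dy fuel cx cy).2
      && pvAt occupied (pvScan seats rows cols dx dy fuel cx cy).1 (pvScan seats rows cols dx dy fuel cx cy).2)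
    = ((((List.range n).map (fun k : Nat => (cx + (k : Int) * dx, cy + (k : Int) * dy))).filter
        (fun p => pvAt seats p.1 p.2)).map (fun p => pvAt occupied p.1 p.2)).headD false := by
  induction n with
  | zero =>
    intro fuel cx cy _ _ hout
    simp only [Nat.cast_zero, zero_mul, add_zero] at hout
    rw [pv_scan_stop seats rows cols dx dy fuel cx cy hout]
    simp [hout]
  | succ n ih =>
    intro fuel cx cy hf hin hout
    have h0 : pvInR rows cols cx cy = true := by
      have := hin 0 (Nat.succ_pos n)
      simpa using this
    obtain ⟨f, rfl⟩ : ∃ f, fuel = f + 1 := ⟨fuel - 1, by omega⟩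
    by_cases hs : pvAt seats cx cy = true
    · have hstop : pvScan seats rows cols dx dy (f + 1) cx cy = (cx, cy) := by
        simp [pvScan, hs]
      rw [hstop]
      rw [List.range_succ_eq_map]
      simp [h0, hs]
    · have hstep : pvScan seats rows cols dx dy (f + 1) cx cy
          = pvScan seats rows cols dx dy f (cx + dx) (cy + dy) := by
        simp [pvScan, h0, hs]
      rw [hstep]
      have hin' : ∀ k : Nat, k < n → pvInR rows cols ((cx + dx) + k * dx) ((cy + dy) + k * dy) = true := by
        intro k hk
        have := hin (k + 1) (by omega)
        have e1 : cx + ((k : Int) + 1) * dx = (cx + dx) + (k : Int) * dx := by ring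
        have e2 : cy + ((k : Int) + 1) * dy = (cy + dy) + (k : Int) * dy := by ring
        push_cast at this
        rw [e1, e2] at this
        exact this
      have hout' : pvInR rows cols ((cx + dx) + n * dx) ((cy + dy) + n * dy) = false := by
        have e1 : cx + ((n : Int) + 1) * dx = (cx + dx) + (n : Int) * dx := by ring
        have e2 : cy + ((n : Int) + 1) * dy = (cy + dy) + (n : Int) * dy := by ring
        push_cast at hout
        rw [e1, e2] at hout
        exact hout
      rw [ih f (cx + dx) (cy + dy) (by omega) hin' hout']
      rw [List.range_succ_eq_map]
      simp only [List.map_cons, Nat.cast_zero, zero_mul, add_zero, List.map_map]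
      rw [List.filter_cons]
      simp only [hs, Bool.false_eq_true, if_false]
      congr 2
      congr 1
      apply List.map_congr_left
      intro k _
      simp only [Function.comp_apply]
      push_cast
      exact Prod.ext (by ring) (by ring)

-- per direction, A's scan verdict = B's ray verdict (in-range position)
theorem pvExt_neg (rows cols c l : Int) : pvExt rows cols (-1) c l = c := by simp [pvExt]
theorem pvExt_zero (rows cols c l : Int) : pvExt rows cols 0 c l = rows + cols := by simp [pvExt]
theorem pvExt_one (rows cols c l : Int) : pvExt rows cols 1 c l = l - 1 - c := by simp [pvExt]

theorem pv_dir_eq (seats occupied : List (List Bool)) (x y dx dy : Int)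
    (hmem : (dx, dy) ∈ pvDirs)
    (rows cols : Int) (hrows : rows = (seats.length : Int))
    (hx : 0 ≤ x) (hx' : x < rows) (hy : 0 ≤ y) (hy' : y < cols) :
    pvVisible seats occupied rows cols x y dx dy
      = pvRayOcc seats occupied rows cols x y dx dy := by
  have hsteps : (∀ k : Nat, k < (min (pvExt rows cols dx x rows) (pvExt rows cols dy y cols)).toNat →
        pvInR rows cols ((x + dx) + k * dx) ((y + dy) + k * dy) = true) ∧
      pvInR rows cols ((x + dx) + ((min (pvExt rows cols dx x rows) (pvExt rows cols dy y cols)).toNat : Int) * dx)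
        ((y + dy) + ((min (pvExt rows cols dx x rows) (pvExt rows cols dy y cols)).toNat : Int) * dy) = false ∧
      (min (pvExt rows cols dx x rows) (pvExt rows cols dy y cols)).toNat ≤ rows.toNat + cols.toNat + 2 := by
    fin_cases hmem <;>
      simp only [pvExt_neg, pvExt_zero, pvExt_one] <;>
      refine ⟨fun k hk => ?_, ?_, by omega⟩ <;>
      simp only [pvInR] <;> simp <;> omega
  obtain ⟨hin, hout, hfuel⟩ := hsteps
  unfold pvVisible pvRayOcc
  dsimp only
  rw [pv_ray seats occupied rows cols dx dy
      (min (pvExt rows cols dx x rows) (pvExt rows cols dy y cols)).toNat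
      (rows.toNat + cols.toNat + 2) (x + dx) (y + dy) hfuel hin hout]
  rw [PySem.List.pyRange_one]
  simp only [List.map_map]
  have hN : min (pvExt rows cols dx x rows) (pvExt rows cols dy y cols) + 1 - 1
      = min (pvExt rows cols dx x rows) (pvExt rows cols dy y cols) := by ring
  rw [hN]
  congr 2
  congr 1
  apply List.map_congr_left
  intro k _
  simp only [Function.comp_apply]
  exact Prod.ext (by ring) (by ring)

theorem pv_beq_zero (n : Nat) : ((0 + (n : Int)) == 0) = decide (n = 0) := by
  cases n with
  | zero => norm_num
  | succ k => simp; omega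

-- ===== VERDICT (by name: the statement is the Claim_ definition above) =====
theorem new_seat_state2_spec : Claim_equal_new_seat_state2 := by
  intro seats occupied x y _ hpre
  obtain ⟨hne, hpre⟩ := hpre
  have hcols : PySem.List.pyGetD seats 0 ([] : List Bool) = seats.headI := by
    cases seats with
    | nil => exact absurd rfl hne
    | cons a l => exact PySem.List.pyGetD_zero_cons a l []
  unfold Spec_new_seat_state2 new_seat_state2 new_seat_state2_alt
  rw [hcols]
  dsimp only
  rcases hpre with hfar | ⟨_, _, _, hx, hx', hy, hy'⟩
  · -- far outside: A sees nothing in any direction, B's guard is false; both True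
    have hgf : (decide (0 ≤ x) && decide (x < (seats.length : Int))
        && decide (0 ≤ y) && decide (y < ((seats.headI).length : Int))) ≠ true := by
      intro hg
      simp only [Bool.and_eq_true, decide_eq_true_eq] at hg
      obtain ⟨⟨⟨h1, h2⟩, h3⟩, h4⟩ := hg
      rcases hfar with h | h | h | h <;> omega
    split_ifs with hg hocc
    · exact absurd hg hgf
    · exact absurd hg hgf
    · apply pv_goA_all_false
      intro d hd
      obtain ⟨b1, b2, b3, b4⟩ := pv_dirs_bounds d.1 d.2 (by simpa using hd)
      have hstart : pvInR (seats.length : Int) ((seats.headI).length : Int) (x + d.1) (y + d.2) = false := by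
        simp only [pvInR]
        rcases hfar with h | h | h | h <;> simp <;> omega
      unfold pvVisible
      dsimp only
      rw [pv_scan_stop _ _ _ _ _ _ _ _ hstart]
      simp [hstart]
  · -- position in range: count visible directions on both sides
    have hcong : List.countP (fun d => pvVisible seats occupied (seats.length : Int) ((seats.headI).length : Int) x y d.1 d.2) pvDirs
        = List.countP (fun d => pvRayOcc seats occupied (seats.length : Int) ((seats.headI).length : Int) x y d.1 d.2) pvDirs := by
      apply List.countP_congr
      intro d hd
      have := pv_dir_eq seats occupied x y d.1 d.2 (by simpa using hd)
        (seats.length : Int) ((seats.headI).length : Int) rfl hx hx' hy hy'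
      rw [this]
    split_ifs with hg hocc
    · -- empty current seat: A's verdict is 'no visible direction'
      have hocc' : pvAt occupied x y = false := by simpa using hocc
      rw [pv_foldl_count (fun d => pvRayOcc seats occupied (seats.length : Int) ((seats.headI).length : Int) x y d.1 d.2) pvDirs 0,
        (pv_goA_eq seats occupied _ _ x y pvDirs 0).1 hocc', hcong, pv_beq_zero]
    · -- occupied current seat: A's verdict is 'fewer than 5 visible'
      have hocc' : pvAt occupied x y = true := by simpa using hocc
      rw [pv_foldl_count (fun d => pvRayOcc seats occupied (seats.length : Int) ((seats.headI).length : Int) x y d.1 d.2) pvDirs 0,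
        (pv_goA_eq seats occupied _ _ x y pvDirs 0).2 hocc' (by norm_num), hcong]
    · -- the guard cannot fail for an in-range position
      exfalso
      apply hg
      simp only [Bool.and_eq_true, decide_eq_true_eq]
      exact ⟨⟨⟨hx, hx'⟩, hy⟩, hy'⟩
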